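-- pv_equiv track=rewrite | github.com/ChEB-AI/python-chebai | train.py | crawl_info
-- ===== SOURCE A (Python) =====
-- def crawl_info(DAG, sink_parents):
--   topological_order = [int(i[0]) for i in DAG]
--   target_nodes = [int(i[1]) for i in DAG]
--   sink = target_nodes[-1]
--   sources = []
--   parents = {}
--
--   for i in range(len(topological_order)):
--     for j in range(len(target_nodes)):
--       if topological_order[i] == target_nodes[j]:
--         if topological_order[i] not in parents.keys():
--           parents[topological_order[i]] = []
--         parents[topological_order[i]].append(topological_order[j])
--
--   for node in topological_order:
--     if node not in parents.keys():
--       sources.append(node)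
--
--   return topological_order, sources, parents, sink, sink_parents
-- ===== SOURCE B (Python) =====
-- def crawl_info(DAG, sink_parents):
--     # index: target value -> list of sources of edges pointing at it (one pass),
--     # then a single pass over the source column replaces A's nested scans.
--     topological_order = [int(s) for s, _ in DAG]
--     idx = {}
--     for s, t in DAG:
--         idx.setdefault(int(t), []).append(int(s))
--     sink = int(DAG[-1][1])
--     sources = []
--     parents = {}
--     for node in topological_order:
--         srcs = idx.get(node)
--         if srcs is None:
--             sources.append(node)
--         else:
--             parents.setdefault(node, []).extend(srcs)
--     return topological_order, sources, parents, sink, sink_parents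
-- ===== Notes on version B (the rewrite author's own statement) =====
-- stated objective: alternative
-- what changed: B builds a dict index from target value to the list of edge sources in one pass and then does a single pass over the source column, replacing A's quadratic nested index scans and its separate source-detection pass; asymptotically O(n+output) vs O(n^2), though the measured speed-up depends on the input family.
import Mathlib
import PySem

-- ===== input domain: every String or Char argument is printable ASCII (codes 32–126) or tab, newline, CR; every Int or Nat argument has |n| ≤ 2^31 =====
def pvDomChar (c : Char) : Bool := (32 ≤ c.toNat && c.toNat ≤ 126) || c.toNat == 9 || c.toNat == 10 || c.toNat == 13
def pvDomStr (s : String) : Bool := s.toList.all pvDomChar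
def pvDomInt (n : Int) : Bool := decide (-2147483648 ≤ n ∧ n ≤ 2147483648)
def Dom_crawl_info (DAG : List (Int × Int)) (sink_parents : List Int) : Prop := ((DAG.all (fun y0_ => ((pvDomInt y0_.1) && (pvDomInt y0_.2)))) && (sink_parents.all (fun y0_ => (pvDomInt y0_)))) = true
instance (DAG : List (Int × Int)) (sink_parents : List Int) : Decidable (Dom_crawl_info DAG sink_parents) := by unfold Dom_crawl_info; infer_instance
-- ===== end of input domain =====

-- B replaces A's nested index scans by a one-pass dict index (target → sources) and a single pass; return value only (no observable mutation).


-- ===== PORT A =====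
def crawl_info (DAG : List (Int × Int)) (sink_parents : List Int) : List Int × List Int × (List (Int × List Int)) × Int × List Int :=
  let topological_order : List Int := DAG.map (fun i => i.1)
  let target_nodes : List Int := DAG.map (fun i => i.2)
  -- target_nodes[-1]: Python raises IndexError on DAG = []; Pre_crawl_info excludes that input
  let sink : Int := (PySem.List.pyGet? target_nodes (-1)).getD 0
  let parents : PySem.Dict Int (List Int) :=
    (PySem.List.pyRange 0 (PySem.List.len topological_order)).foldl (fun p i =>
      (PySem.List.pyRange 0 (PySem.List.len target_nodes)).foldl (fun p j =>
        if PySem.List.pyGetD topological_order i 0 = PySem.List.pyGetD target_nodes j 0 then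
          let p := if p.contains (PySem.List.pyGetD topological_order i 0) then p
                   else p.insert (PySem.List.pyGetD topological_order i 0) []
          p.modify (PySem.List.pyGetD topological_order i 0) [] (fun l => l ++ [PySem.List.pyGetD topological_order j 0])
        else p) p) PySem.Dict.empty
  let sources : List Int := topological_order.foldl (fun srcs node =>
    if parents.contains node then srcs else srcs ++ [node]) []
  (topological_order, sources, parents.items, sink, sink_parents)

-- ===== PORT B =====
def crawl_info_alt (DAG : List (Int × Int)) (sink_parents : List Int) : List Int × List Int × (List (Int × List Int)) × Int × List Int :=
  let topological_order : List Int := DAG.map (fun e => e.1)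
  -- idx.setdefault(t, []).append(s)  ≡  idx[t] = idx.get(t, []) + [s]  (Dict.modify)
  let idx : PySem.Dict Int (List Int) :=
    DAG.foldl (fun d e => d.modify e.2 [] (fun l => l ++ [e.1])) PySem.Dict.empty
  -- DAG[-1][1]: Python raises IndexError on DAG = []; Pre_crawl_info excludes that input
  let sink : Int := ((PySem.List.pyGet? DAG (-1)).getD (0, 0)).2
  let sp : List Int × PySem.Dict Int (List Int) :=
    topological_order.foldl (fun acc node =>
      match idx.get? node with
      | none => (acc.1 ++ [node], acc.2)
      | some srcs => (acc.1, acc.2.modify node [] (fun l => l ++ srcs))) ([], PySem.Dict.empty)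
  (topological_order, sp.1, sp.2.items, sink, sink_parents)

-- ===== PRECONDITION & SPEC =====
-- Python A evaluates target_nodes[-1], which raises IndexError iff DAG is empty; only that input is excluded.
def Pre_crawl_info (DAG : List (Int × Int)) (sink_parents : List Int) : Prop := DAG ≠ []
instance (DAG : List (Int × Int)) (sink_parents : List Int) : Decidable (Pre_crawl_info DAG sink_parents) := by unfold Pre_crawl_info; infer_instance
def pvWitness_crawl_info : (List (Int × Int)) × List Int := ([(1, 2), (2, 3)], [0])

def Spec_crawl_info (DAG : List (Int × Int)) (sink_parents : List Int) (out : List Int × List Int × (List (Int × List Int)) × Int × List Int) : Prop := out = crawl_info_alt DAG sink_parents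
instance (DAG : List (Int × Int)) (sink_parents : List Int) (out : List Int × List Int × (List (Int × List Int)) × Int × List Int) : Decidable (Spec_crawl_info DAG sink_parents out) := by unfold Spec_crawl_info; infer_instance

-- ===== CLAIM (what is proved, stated in full; the proofs are below) =====
def Claim_equal_crawl_info : Prop := ∀ (DAG : List (Int × Int)) (sink_parents : List Int), Dom_crawl_info DAG sink_parents → Pre_crawl_info DAG sink_parents → Spec_crawl_info DAG sink_parents (crawl_info DAG sink_parents)

-- ===== LEMMAS AND PROOFS =====

-- closed form of B's index: getD is the source column of the edges targeting v
lemma idx_getD (DAG : List (Int × Int)) (v : Int) :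
    (DAG.foldl (fun d e => d.modify e.2 [] (fun l => l ++ [e.1])) PySem.Dict.empty).getD v [] =
    (DAG.filter (fun e => e.2 == v)).map (fun e => e.1) := by
  have h := PySem.Dict.getD_foldl_modify_append (DAG.map Prod.swap) (PySem.Dict.empty) v
  rw [List.foldl_map] at h
  simpa [List.filter_map, List.map_map, Function.comp] using h

-- B's index has key v exactly when v occurs as a target
lemma idx_get?_eq_none_iff (DAG : List (Int × Int)) (v : Int) :
    (DAG.foldl (fun d e => d.modify e.2 [] (fun l => l ++ [e.1])) PySem.Dict.empty).get? v = none ↔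
    v ∉ DAG.map (fun e => e.2) := by
  rw [PySem.Dict.get?_eq_none_iff_not_mem_keys]
  rw [PySem.Dict.keys_foldl_modify_key DAG (fun e => e.2) [] (fun d e => (fun l => l ++ [e.1]))]
  rw [not_iff_not]
  simp [PySem.Set.mem_update, PySem.Dict.keys_empty]

-- A's "insert [] if missing, then append" is a single modify
lemma ensure_modify (p : PySem.Dict Int (List Int)) (v : Int) (f : List Int → List Int) :
    (if p.contains v then p else p.insert v []).modify v [] f = p.modify v [] f := by
  by_cases h : p.contains v
  · simp [h]
  · simp only [Bool.not_eq_true] at h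
    simp [h, PySem.Dict.modify, PySem.Dict.getD_insert_self, PySem.Dict.insert_insert_self,
      PySem.Dict.getD_of_not_contains _ _ h]

lemma modify_modify (p : PySem.Dict Int (List Int)) (v : Int) (f g : List Int → List Int) :
    (p.modify v [] f).modify v [] g = p.modify v [] (fun l => g (f l)) := by
  simp [PySem.Dict.modify, PySem.Dict.getD_insert_self, PySem.Dict.insert_insert_self]

-- closed form of A's inner j-loop, seen as a fold over the edges
lemma innerA (DAG : List (Int × Int)) (v : Int) (p : PySem.Dict Int (List Int)) :
    DAG.foldl (fun p e => if v = e.2 then p.modify v [] (fun l => l ++ [e.1]) else p) p =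
    if v ∈ DAG.map (fun e => e.2) then
      p.modify v [] (fun l => l ++ (DAG.filter (fun e => e.2 == v)).map (fun e => e.1))
    else p := by
  induction DAG generalizing p with
  | nil => simp
  | cons a rest ih =>
    by_cases h : v = a.2
    · subst h
      simp only [List.foldl_cons, List.map_cons, List.mem_cons, true_or, if_pos]
      rw [ih]
      by_cases hm : a.2 ∈ rest.map (fun e => e.2)
      · rw [if_pos hm, modify_modify]
        simp
      · rw [if_neg hm]
        have hnil : rest.filter (fun e => e.2 == a.2) = [] := by
          rw [List.filter_eq_nil_iff]
          intro e he
          simp only [beq_iff_eq]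
          intro hc
          exact hm (List.mem_map.mpr ⟨e, he, hc⟩)
        simp [hnil]
    · simp only [List.foldl_cons, if_neg h]
      rw [ih]
      have hne : ¬ (a.2 == v) = true := by simp [Ne.symm h]
      by_cases hm : v ∈ rest.map (fun e => e.2)
      · simp [hne, hm]
      · have hnc : v ∉ (a :: rest).map (fun e => e.2) := by
          simp only [List.map_cons, List.mem_cons]
          rintro (rfl | hr)
          · exact h rfl
          · exact hm hr
        rw [if_neg hm, if_neg hnc]

-- membership in A's finished parents dict
lemma parents_contains (DAG : List (Int × Int)) (l : List Int) (p : PySem.Dict Int (List Int)) (w : Int) :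
    (l.foldl (fun p v => if v ∈ DAG.map (fun e => e.2) then
        p.modify v [] (fun x => x ++ (DAG.filter (fun e => e.2 == v)).map (fun e => e.1)) else p) p).contains w = true ↔
    (p.contains w = true ∨ (w ∈ l ∧ w ∈ DAG.map (fun e => e.2))) := by
  induction l generalizing p with
  | nil => simp
  | cons v rest ih =>
    simp only [List.foldl_cons]
    by_cases hv : v ∈ DAG.map (fun e => e.2)
    · rw [if_pos hv, ih, PySem.Dict.contains_modify]
      by_cases hw : w = v
      · subst hw; simp [hv]
      · have hb : (w == v) = false := by simp [hw]
        simp only [hb, Bool.false_or, List.mem_cons]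
        tauto
    · rw [if_neg hv, ih]
      constructor
      · rintro (hp | ⟨h1, h2⟩)
        · exact Or.inl hp
        · exact Or.inr ⟨List.mem_cons_of_mem _ h1, h2⟩
      · rintro (hp | ⟨h1, h2⟩)
        · exact Or.inl hp
        · rcases List.mem_cons.mp h1 with rfl | h1
          · exact absurd h2 hv
          · exact Or.inr ⟨h1, h2⟩

lemma pyGet?_map {α β : Type} (f : α → β) (xs : List α) (i : Int) :
    PySem.List.pyGet? (xs.map f) i = (PySem.List.pyGet? xs i).map f := by
  simp [PySem.List.pyGet?, PySem.List.pyIdx?]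

-- A's parents loop, reduced to a single fold over the source column
lemma parentsA_eq (DAG : List (Int × Int)) :
    ((PySem.List.pyRange 0 (PySem.List.len (DAG.map (fun i => i.1)))).foldl (fun p i =>
      (PySem.List.pyRange 0 (PySem.List.len (DAG.map (fun i => i.2)))).foldl (fun p j =>
        if PySem.List.pyGetD (DAG.map (fun i => i.1)) i 0 = PySem.List.pyGetD (DAG.map (fun i => i.2)) j 0 then
          (if p.contains (PySem.List.pyGetD (DAG.map (fun i => i.1)) i 0) then p
           else p.insert (PySem.List.pyGetD (DAG.map (fun i => i.1)) i 0) []).modify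
            (PySem.List.pyGetD (DAG.map (fun i => i.1)) i 0) []
            (fun l => l ++ [PySem.List.pyGetD (DAG.map (fun i => i.1)) j 0])
        else p) p) PySem.Dict.empty) =
    (DAG.map (fun i => i.1)).foldl (fun p v => if v ∈ DAG.map (fun e => e.2) then
        p.modify v [] (fun x => x ++ (DAG.filter (fun e => e.2 == v)).map (fun e => e.1)) else p)
      PySem.Dict.empty := by
  have hfst : ∀ j : Int, PySem.List.pyGetD (DAG.map (fun i => i.1)) j 0 = (PySem.List.pyGetD DAG j (0, 0)).1 :=
    fun j => PySem.List.pyGetD_map (fun e => e.1) DAG j (0, 0)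
  have hsnd : ∀ j : Int, PySem.List.pyGetD (DAG.map (fun i => i.2)) j 0 = (PySem.List.pyGetD DAG j (0, 0)).2 :=
    fun j => PySem.List.pyGetD_map (fun e => e.2) DAG j (0, 0)
  have hlen : PySem.List.len (DAG.map (fun i : Int × Int => i.2)) = PySem.List.len DAG := by
    simp [PySem.List.len]
  have hinner : ∀ (p : PySem.Dict Int (List Int)) (v : Int),
      (PySem.List.pyRange 0 (PySem.List.len (DAG.map (fun i => i.2)))).foldl (fun p j =>
        if v = PySem.List.pyGetD (DAG.map (fun i => i.2)) j 0 then
          (if p.contains v then p else p.insert v []).modify v []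
            (fun l => l ++ [PySem.List.pyGetD (DAG.map (fun i => i.1)) j 0])
        else p) p =
      if v ∈ DAG.map (fun e => e.2) then
        p.modify v [] (fun x => x ++ (DAG.filter (fun e => e.2 == v)).map (fun e => e.1))
      else p := by
    intro p v
    have hb : (fun (p : PySem.Dict Int (List Int)) (j : Int) =>
        if v = PySem.List.pyGetD (DAG.map (fun i => i.2)) j 0 then
          (if p.contains v then p else p.insert v []).modify v []
            (fun l => l ++ [PySem.List.pyGetD (DAG.map (fun i => i.1)) j 0])
        else p) =
        (fun p j =>
          (fun (p : PySem.Dict Int (List Int)) (e : Int × Int) =>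
            if v = e.2 then p.modify v [] (fun l => l ++ [e.1]) else p) p (PySem.List.pyGetD DAG j (0, 0))) := by
      funext p j
      rw [hfst, hsnd, ensure_modify]
    rw [hb, hlen]
    have h0 : (0 : Int) ≤ 0 := le_refl 0
    rw [PySem.List.foldl_pyRange_pyGetD DAG (0, 0)
      (fun (p : PySem.Dict Int (List Int)) (e : Int × Int) =>
        if v = e.2 then p.modify v [] (fun l => l ++ [e.1]) else p) p h0]
    simpa using innerA DAG v p
  have hout : (fun (p : PySem.Dict Int (List Int)) (i : Int) =>
      (PySem.List.pyRange 0 (PySem.List.len (DAG.map (fun i => i.2)))).foldl (fun p j =>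
        if PySem.List.pyGetD (DAG.map (fun i => i.1)) i 0 = PySem.List.pyGetD (DAG.map (fun i => i.2)) j 0 then
          (if p.contains (PySem.List.pyGetD (DAG.map (fun i => i.1)) i 0) then p
           else p.insert (PySem.List.pyGetD (DAG.map (fun i => i.1)) i 0) []).modify
            (PySem.List.pyGetD (DAG.map (fun i => i.1)) i 0) []
            (fun l => l ++ [PySem.List.pyGetD (DAG.map (fun i => i.1)) j 0])
        else p) p) =
      (fun p i =>
        (fun (p : PySem.Dict Int (List Int)) (v : Int) => if v ∈ DAG.map (fun e => e.2) then
          p.modify v [] (fun x => x ++ (DAG.filter (fun e => e.2 == v)).map (fun e => e.1)) else p)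
        p (PySem.List.pyGetD (DAG.map (fun i => i.1)) i 0)) := by
    funext p i
    exact hinner p (PySem.List.pyGetD (DAG.map (fun i => i.1)) i 0)
  rw [hout]
  rw [PySem.List.foldl_pyRange_pyGetD (DAG.map (fun i => i.1)) 0
    (fun (p : PySem.Dict Int (List Int)) (v : Int) => if v ∈ DAG.map (fun e => e.2) then
      p.modify v [] (fun x => x ++ (DAG.filter (fun e => e.2 == v)).map (fun e => e.1)) else p)
    PySem.Dict.empty (le_refl 0)]
  simp

-- ===== VERDICT (by name: the statement is the Claim_ definition above) =====
theorem crawl_info_spec : Claim_equal_crawl_info := by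
  intro DAG sink_parents _ hpre
  unfold Spec_crawl_info crawl_info crawl_info_alt
  simp only [Prod.mk.injEq]
  set tg := DAG.map (fun e : Int × Int => e.2) with htg
  set topo := DAG.map (fun e : Int × Int => e.1) with htopo
  set idx := DAG.foldl (fun d e => d.modify e.2 [] (fun l => l ++ [e.1])) PySem.Dict.empty with hidx
  set P := topo.foldl (fun p v => if v ∈ tg then
      p.modify v [] (fun x => x ++ (DAG.filter (fun e => e.2 == v)).map (fun e => e.1)) else p)
    PySem.Dict.empty with hP
  -- B's single pass, split into two independent folds
  have hstep : (fun (acc : List Int × PySem.Dict Int (List Int)) (node : Int) =>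
      match idx.get? node with
      | none => (acc.1 ++ [node], acc.2)
      | some srcs => (acc.1, acc.2.modify node [] (fun l => l ++ srcs))) =
      (fun acc node =>
        ((fun (s : List Int) (node : Int) => if node ∈ tg then s else s ++ [node]) acc.1 node,
         (fun (p : PySem.Dict Int (List Int)) (v : Int) => if v ∈ tg then
            p.modify v [] (fun x => x ++ (DAG.filter (fun e => e.2 == v)).map (fun e => e.1)) else p) acc.2 node)) := by
    funext acc node
    by_cases hm : node ∈ tg
    · have hne : idx.get? node ≠ none := by
        intro h0
        rw [hidx, idx_get?_eq_none_iff] at h0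
        exact h0 (htg ▸ hm)
      obtain ⟨srcs, hs⟩ := Option.ne_none_iff_exists'.mp hne
      have hval : srcs = (DAG.filter (fun e => e.2 == node)).map (fun e => e.1) := by
        have h2 := idx_getD DAG node
        rw [← hidx, PySem.Dict.getD_eq_get?_getD, hs] at h2
        simpa using h2
      rw [hs]
      simp [hm, hval]
    · have h0 : idx.get? node = none := by
        rw [hidx, idx_get?_eq_none_iff]; simpa [htg] using hm
      rw [h0]
      simp [hm]
  rw [hstep]
  rw [PySem.List.foldl_prod_mk
    (fun (s : List Int) (node : Int) => if node ∈ tg then s else s ++ [node])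
    (fun (p : PySem.Dict Int (List Int)) (v : Int) => if v ∈ tg then
      p.modify v [] (fun x => x ++ (DAG.filter (fun e => e.2 == v)).map (fun e => e.1)) else p)
    topo [] PySem.Dict.empty]
  -- A's parents equal B's parents
  have hpar : ((PySem.List.pyRange 0 (PySem.List.len topo)).foldl (fun p i =>
      (PySem.List.pyRange 0 (PySem.List.len tg)).foldl (fun p j =>
        if PySem.List.pyGetD topo i 0 = PySem.List.pyGetD tg j 0 then
          (if p.contains (PySem.List.pyGetD topo i 0) then p
           else p.insert (PySem.List.pyGetD topo i 0) []).modify (PySem.List.pyGetD topo i 0) []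
            (fun l => l ++ [PySem.List.pyGetD topo j 0])
        else p) p) PySem.Dict.empty) = P := by
    rw [htopo, htg, hP]
    exact parentsA_eq DAG
  refine ⟨trivial, ?_, ?_, ?_, trivial⟩
  · -- sources
    rw [hpar]
    apply PySem.List.foldl_congr_mem
    intro acc node hnode
    have hc := parents_contains DAG topo PySem.Dict.empty node
    rw [← hP] at hc
    simp only [PySem.Dict.contains_empty, Bool.false_eq_true, false_or] at hc
    by_cases hm : node ∈ tg
    · have : P.contains node = true := hc.mpr ⟨hnode, hm⟩
      simp [this, hm]
    · have : ¬ P.contains node = true := fun h => hm (hc.mp h).2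
      simp only [Bool.not_eq_true] at this
      simp [this, hm]
  · -- parents items
    rw [hpar]
  · -- sink
    rw [htg, pyGet?_map]
    cases PySem.List.pyGet? DAG (-1) with
    | none => rfl
    | some e => rfl
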